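-- pv_equiv track=rewrite | github.com/annunakichb/neuroevolution | src/domains/vee/evolution.py | genome_distance
-- ===== SOURCE A (Python) =====
-- def genome_distance(g1,g2):
--     dis = 0
--     for i in range(max(len(g1),len(g2))):
--         if i < len(g1) and i < len(g2):
--             dis += abs(int(g1[i]) - int(g2[i]))
--         elif i >= len(g1):
--             dis += g2[i] + 1
--         elif i >= len(g2):
--             dis += g1[i] + 1
--     return dis
-- ===== SOURCE B (Python) =====
-- def genome_distance(g1, g2):
--     a, b = g1[::-1], g2[::-1]
--     dis = 0
--     while a and b:
--         dis += abs(int(a.pop()) - int(b.pop()))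
--     rest = a if a else b
--     while rest:
--         dis += rest.pop() + 1
--     return dis
-- ===== Notes on version B (the rewrite author's own statement) =====
-- stated objective: alternative
-- what changed: Replaces A's single index loop over range(max(len,len)) with per-index branch tests by an explicit stack traversal: reverse both lists into stacks, consume matched pairs by destructive pops, then drain the surviving stack for the tail contribution.
import Mathlib
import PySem

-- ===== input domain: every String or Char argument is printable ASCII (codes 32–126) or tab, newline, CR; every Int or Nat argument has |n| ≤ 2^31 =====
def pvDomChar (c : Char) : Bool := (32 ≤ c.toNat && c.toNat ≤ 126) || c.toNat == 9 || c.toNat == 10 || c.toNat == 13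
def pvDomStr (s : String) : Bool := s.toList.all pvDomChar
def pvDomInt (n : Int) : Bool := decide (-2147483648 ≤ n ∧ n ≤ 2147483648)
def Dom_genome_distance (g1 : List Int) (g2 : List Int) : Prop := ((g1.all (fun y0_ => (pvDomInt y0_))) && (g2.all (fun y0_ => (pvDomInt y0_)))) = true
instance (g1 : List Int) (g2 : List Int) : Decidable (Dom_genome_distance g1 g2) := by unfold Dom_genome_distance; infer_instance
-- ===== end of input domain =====

-- B replaces A's index loop with per-index branch tests by an explicit stack traversal:
-- reverse both lists into stacks, pop matched pairs, then drain the surviving stack (objective: alternative).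

-- ===== PORT A =====
-- A: one loop over range(max(len g1, len g2)); inside each branch the index is in range,
-- so g[i] is ported as getD i 0 (exact there); int() on an int is the identity.
def genome_distance (g1 : List Int) (g2 : List Int) : Int :=
  (List.range (max g1.length g2.length)).foldl
    (fun dis i =>
      if i < g1.length ∧ i < g2.length then dis + |g1.getD i 0 - g2.getD i 0|
      else if g1.length ≤ i then dis + g2.getD i 0 + 1
      else if g2.length ≤ i then dis + g1.getD i 0 + 1
      else dis) 0

-- ===== PORT B =====
-- B's second while loop: drain the stack, adding x+1 per popped element
-- (Python's rest.pop() = last element, then dropLast; getLastD 0 is exact on the nonempty branch).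
def gdDrain (rest : List Int) (dis : Int) : Int :=
  if rest = [] then dis
  else gdDrain rest.dropLast (dis + rest.getLastD 0 + 1)
termination_by rest.length
decreasing_by
  rename_i h
  have : rest.length ≠ 0 := fun h0 => h (List.eq_nil_of_length_eq_zero h0)
  simp [List.length_dropLast]; omega

-- B's first while loop: pop a pair off both stacks while both are nonempty,
-- then hand the surviving stack to the drain loop.
def gdPairs (a : List Int) (b : List Int) (dis : Int) : Int :=
  if a ≠ [] ∧ b ≠ [] then
    gdPairs a.dropLast b.dropLast (dis + |a.getLastD 0 - b.getLastD 0|)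
  else gdDrain (if a ≠ [] then a else b) dis
termination_by a.length
decreasing_by
  rename_i h
  have : a.length ≠ 0 := fun h0 => h.1 (List.eq_nil_of_length_eq_zero h0)
  simp [List.length_dropLast]; omega

def genome_distance_alt (g1 : List Int) (g2 : List Int) : Int :=
  gdPairs g1.reverse g2.reverse 0

-- ===== PRECONDITION & SPEC =====
def Spec_genome_distance (g1 : List Int) (g2 : List Int) (out : Int) : Prop := out = genome_distance_alt g1 g2
instance (g1 : List Int) (g2 : List Int) (out : Int) : Decidable (Spec_genome_distance g1 g2 out) := by unfold Spec_genome_distance; infer_instance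

-- ===== CLAIM (what is proved, stated in full; the proofs are below) =====
def Claim_equal_genome_distance : Prop := ∀ (g1 : List Int) (g2 : List Int), Dom_genome_distance g1 g2 → Spec_genome_distance g1 g2 (genome_distance g1 g2)

-- ===== LEMMAS AND PROOFS =====

-- A's per-index contribution, read off its branch structure.
def gdTerm (g1 g2 : List Int) (i : Nat) : Int :=
  if i < g1.length ∧ i < g2.length then |g1.getD i 0 - g2.getD i 0|
  else if g1.length ≤ i then g2.getD i 0 + 1
  else if g2.length ≤ i then g1.getD i 0 + 1
  else 0

theorem gd_foldl_eq_sum (g1 g2 : List Int) (l : List Nat) (acc : Int) :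
    l.foldl (fun dis i =>
      if i < g1.length ∧ i < g2.length then dis + |g1.getD i 0 - g2.getD i 0|
      else if g1.length ≤ i then dis + g2.getD i 0 + 1
      else if g2.length ≤ i then dis + g1.getD i 0 + 1
      else dis) acc = acc + (l.map (gdTerm g1 g2)).sum := by
  induction l generalizing acc with
  | nil => simp
  | cons i l ih =>
    simp only [List.foldl_cons, List.map_cons, List.sum_cons, ih, gdTerm]
    split_ifs <;> ring

theorem gd_sum_nil_left (g2 : List Int) :
    ((List.range g2.length).map (gdTerm [] g2)).sum = g2.sum + g2.length := by
  induction g2 with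
  | nil => simp
  | cons b g2 ih =>
    rw [List.length_cons, List.range_succ_eq_map]
    simp only [List.map_cons, List.map_map, List.sum_cons]
    have h0 : gdTerm [] (b :: g2) 0 = b + 1 := by simp [gdTerm]
    have : (List.range g2.length).map (gdTerm [] (b :: g2) ∘ Nat.succ)
        = (List.range g2.length).map (gdTerm [] g2) := by
      apply List.map_congr_left; intro i _; simp [gdTerm]
    rw [h0, this, ih]
    push_cast; ring

theorem gd_sum_nil_right (g1 : List Int) :
    ((List.range g1.length).map (gdTerm g1 [])).sum = g1.sum + g1.length := by
  induction g1 with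
  | nil => simp
  | cons a g1 ih =>
    rw [List.length_cons, List.range_succ_eq_map]
    simp only [List.map_cons, List.map_map, List.sum_cons]
    have h0 : gdTerm (a :: g1) [] 0 = a + 1 := by simp [gdTerm]
    have : (List.range g1.length).map (gdTerm (a :: g1) [] ∘ Nat.succ)
        = (List.range g1.length).map (gdTerm g1 []) := by
      apply List.map_congr_left; intro i _; simp [gdTerm]
    rw [h0, this, ih]
    push_cast; ring

-- A on an empty first argument: the whole loop runs the g2-tail branch.
theorem gdA_nil_left (g2 : List Int) : genome_distance [] g2 = g2.sum + g2.length := by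
  unfold genome_distance
  rw [gd_foldl_eq_sum]
  simp only [List.length_nil, Nat.max_eq_right (Nat.zero_le _), zero_add]
  exact gd_sum_nil_left g2

theorem gdA_nil_right (g1 : List Int) : genome_distance g1 [] = g1.sum + g1.length := by
  unfold genome_distance
  rw [gd_foldl_eq_sum]
  simp only [List.length_nil, Nat.max_eq_left (Nat.zero_le _), zero_add]
  exact gd_sum_nil_right g1

-- A's step equation on two conses.
theorem gdA_cons_cons (a b : Int) (t1 t2 : List Int) :
    genome_distance (a :: t1) (b :: t2) = |a - b| + genome_distance t1 t2 := by
  unfold genome_distance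
  rw [gd_foldl_eq_sum, gd_foldl_eq_sum]
  have hmax : max (a :: t1).length (b :: t2).length = max t1.length t2.length + 1 := by
    simp [Nat.succ_max_succ]
  rw [hmax, List.range_succ_eq_map]
  simp only [List.map_cons, List.map_map, List.sum_cons, zero_add]
  have h0 : gdTerm (a :: t1) (b :: t2) 0 = |a - b| := by simp [gdTerm]
  have hmap : (List.range (max t1.length t2.length)).map (gdTerm (a :: t1) (b :: t2) ∘ Nat.succ)
      = (List.range (max t1.length t2.length)).map (gdTerm t1 t2) := by
    apply List.map_congr_left; intro i _
    simp [gdTerm, Function.comp]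
  rw [h0, hmap]

-- The drain loop over a reversed list pops the original front first; closed form.
theorem gdDrain_reverse (l : List Int) (dis : Int) :
    gdDrain l.reverse dis = dis + l.sum + l.length := by
  induction l generalizing dis with
  | nil => simp [gdDrain]
  | cons x t ih =>
    rw [List.reverse_cons, gdDrain]
    have hne : t.reverse ++ [x] ≠ [] := by simp
    simp only [hne, if_false, List.dropLast_concat, List.getLastD_concat]
    rw [ih]
    simp only [List.sum_cons, List.length_cons]
    push_cast; ring

-- The pair loop over reversed stacks computes exactly A's value plus the accumulator.
theorem gdPairs_reverse (g1 : List Int) :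
    ∀ (g2 : List Int) (dis : Int),
      gdPairs g1.reverse g2.reverse dis = dis + genome_distance g1 g2 := by
  induction g1 with
  | nil =>
    intro g2 dis
    rw [gdPairs, if_neg (by simp), if_neg (by simp)]
    rw [gdDrain_reverse, gdA_nil_left]
    ring
  | cons a t1 ih =>
    intro g2 dis
    cases g2 with
    | nil =>
      rw [gdPairs, if_neg (by simp), if_pos (by simp)]
      rw [gdDrain_reverse, gdA_nil_right]
      ring
    | cons b t2 =>
      rw [gdPairs]
      have h1 : (a :: t1).reverse ≠ [] := by simp
      have h2 : (b :: t2).reverse ≠ [] := by simp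
      rw [if_pos ⟨h1, h2⟩]
      simp only [List.reverse_cons, List.dropLast_concat, List.getLastD_concat]
      rw [ih t2, gdA_cons_cons]
      ring

-- ===== VERDICT (by name: the statement is the Claim_ definition above) =====
theorem genome_distance_spec : Claim_equal_genome_distance := by
  intro g1 g2 _
  unfold Spec_genome_distance genome_distance_alt
  rw [gdPairs_reverse g1 g2 0]
  ring
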